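-- pv_equiv track=rewrite | github.com/xpunch/leetcode | 1375.bulb-switcher-iii/1375.bulb-switcher-iii.py | numTimesAllBlue
-- ===== SOURCE A (Python) =====
-- from typing import List
--
-- def numTimesAllBlue(light: List[int]) -> int:
--     result, lastBlue, maxLight, cache = 0, 0, 0, {}
--     for i in range(len(light)):
--         l = light[i]
--         cache[l] = True
--         if l > maxLight:
--             maxLight = l
--         if lastBlue == l-1:
--             lastBlue = l
--         else:
--             continue
--         allBlue = True
--         for j in range(lastBlue+1, maxLight+1):
--             if cache.__contains__(j) and cache[j]:
--                 lastBlue = j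
--             else:
--                 allBlue = False
--                 break
--         if allBlue:
--             result += 1
--     return result
-- ===== SOURCE B (Python) =====
-- def numTimesAllBlue(light):
--     # Count moments where the distinct positive bulbs seen so far are exactly 1..max.
--     seen = set()
--     result = 0
--     maxv = 0
--     for l in light:
--         if l > maxv:
--             maxv = l
--         if l >= 1 and l not in seen:
--             seen.add(l)
--             if len(seen) == maxv:
--                 result += 1
--     return result
-- ===== Notes on version B (the rewrite author's own statement) =====
-- stated objective: alternative
-- what changed: Replaces A's lastBlue/maxLight simulation with its boolean cache and inner contiguity scan by a single pass that keeps a set of distinct positive values seen and counts the moments where that count equals the running maximum.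
import Mathlib
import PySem

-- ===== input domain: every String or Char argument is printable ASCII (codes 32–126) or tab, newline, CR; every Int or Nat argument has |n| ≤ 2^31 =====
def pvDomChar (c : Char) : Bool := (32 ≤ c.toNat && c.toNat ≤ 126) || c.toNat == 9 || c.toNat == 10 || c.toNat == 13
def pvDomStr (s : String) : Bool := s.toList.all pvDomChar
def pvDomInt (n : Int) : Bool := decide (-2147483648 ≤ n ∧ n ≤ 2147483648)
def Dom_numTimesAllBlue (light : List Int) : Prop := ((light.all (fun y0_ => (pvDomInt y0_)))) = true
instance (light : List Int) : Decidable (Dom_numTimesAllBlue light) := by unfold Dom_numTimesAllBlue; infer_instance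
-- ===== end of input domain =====

-- B replaces A's lastBlue/inner-scan simulation by one pass counting moments where the
-- number of distinct positive values seen equals the running maximum (objective: alternative, same asymptotic cost).

-- ===== PORT A =====
-- inner loop: for j in range(lastBlue+1, maxLight+1): if j in cache and cache[j]: lastBlue = j else: allBlue = False; break
def pvInnerA (cache : PySem.Dict Int Bool) (j b lastBlue : Int) : Int × Bool :=
  if h : j < b then
    if cache.contains j && cache.getD j false then pvInnerA cache (j + 1) b j
    else (lastBlue, false)
  else (lastBlue, true)
termination_by (b - j).toNat
decreasing_by omega

-- one iteration of A's outer loop over state (result, lastBlue, maxLight, cache)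
def pvStepA : (Int × Int × Int × PySem.Dict Int Bool) → Int → (Int × Int × Int × PySem.Dict Int Bool)
  | (result, lastBlue, maxLight, cache), l =>
    let cache := cache.insert l true
    let maxLight := if maxLight < l then l else maxLight
    if lastBlue = l - 1 then
      let r := pvInnerA cache (l + 1) (maxLight + 1) l
      (if r.2 then result + 1 else result, r.1, maxLight, cache)
    else (result, lastBlue, maxLight, cache)

def numTimesAllBlue (light : List Int) : Int :=
  (light.foldl pvStepA (0, 0, 0, (PySem.Dict.empty : PySem.Dict Int Bool))).1

-- ===== PORT B =====
-- one iteration of B's loop over state (seen, result, maxv)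
def pvStepB : (PySem.Set Int × Int × Int) → Int → (PySem.Set Int × Int × Int)
  | (seen, result, maxv), l =>
    let maxv := if maxv < l then l else maxv
    if 1 ≤ l ∧ ¬ PySem.Set.contains seen l then
      let seen := PySem.Set.add seen l
      (seen, if PySem.Set.len seen = maxv then result + 1 else result, maxv)
    else (seen, result, maxv)

def numTimesAllBlue_alt (light : List Int) : Int :=
  (light.foldl pvStepB ((PySem.Set.empty : PySem.Set Int), 0, 0)).2.1

-- ===== PRECONDITION & SPEC =====
def Spec_numTimesAllBlue (light : List Int) (out : Int) : Prop := out = numTimesAllBlue_alt light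
instance (light : List Int) (out : Int) : Decidable (Spec_numTimesAllBlue light out) := by unfold Spec_numTimesAllBlue; infer_instance

-- ===== CLAIM (what is proved, stated in full; the proofs are below) =====
def Claim_equal_numTimesAllBlue : Prop := ∀ (light : List Int), Dom_numTimesAllBlue light → Spec_numTimesAllBlue light (numTimesAllBlue light)

-- ===== LEMMAS AND PROOFS =====

-- joint invariant of the two folds after processing xs
def pvInv (xs : List Int) : Prop :=
  let a := xs.foldl pvStepA (0, 0, 0, (PySem.Dict.empty : PySem.Dict Int Bool))
  let b := xs.foldl pvStepB ((PySem.Set.empty : PySem.Set Int), 0, 0)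
  a.1 = b.2.1 ∧
  a.2.2.1 = b.2.2 ∧
  (∀ v : Int, (a.2.2.2).get? v = if v ∈ xs then some true else none) ∧
  (∀ v : Int, v ∈ b.1 ↔ v ∈ xs ∧ 1 ≤ v) ∧
  b.1.Nodup ∧
  0 ≤ a.2.1 ∧
  (∀ j : Int, 1 ≤ j → j ≤ a.2.1 → j ∈ xs) ∧
  (a.2.1 + 1) ∉ xs ∧
  (∀ v ∈ xs, v ≤ a.2.2.1) ∧
  0 ≤ a.2.2.1 ∧
  a.2.1 ≤ a.2.2.1

lemma pvInnerA_spec (cache : PySem.Dict Int Bool) (X : List Int)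
    (hc : ∀ v : Int, cache.get? v = if v ∈ X then some true else none) :
    ∀ (n : Nat) (a b : Int), b - a ≤ (n : Int) →
    ((pvInnerA cache a b (a - 1)).2 = true ∧
      (∀ j : Int, a ≤ j → j < b → j ∈ X) ∧
      (pvInnerA cache a b (a - 1)).1 = if a < b then b - 1 else a - 1) ∨
    ((pvInnerA cache a b (a - 1)).2 = false ∧
      ∃ j : Int, a ≤ j ∧ j < b ∧ j ∉ X ∧ (∀ i : Int, a ≤ i → i < j → i ∈ X) ∧
        (pvInnerA cache a b (a - 1)).1 = j - 1) := by
  intro n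
  induction n with
  | zero =>
      intro a b hba
      rw [pvInnerA, dif_neg (show ¬ a < b by omega)]
      left
      refine ⟨rfl, fun j hj1 hj2 => absurd (lt_of_le_of_lt hj1 hj2) (by omega), ?_⟩
      rw [if_neg (show ¬ a < b by omega)]
  | succ k ihk =>
      intro a b hba
      by_cases hab : b ≤ a
      · rw [pvInnerA, dif_neg (show ¬ a < b by omega)]
        left
        refine ⟨rfl, fun j hj1 hj2 => absurd (lt_of_le_of_lt hj1 hj2) (by omega), ?_⟩
        rw [if_neg (show ¬ a < b by omega)]
      · have hlt : a < b := by omega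
        by_cases hX : a ∈ X
        · have hcond : (cache.contains a && cache.getD a false) = true := by
            rw [PySem.Dict.contains_eq_isSome_get?, PySem.Dict.getD, hc a, if_pos hX]
            rfl
          have hred : pvInnerA cache a b (a - 1) = pvInnerA cache (a + 1) b a := by
            rw [pvInnerA, dif_pos hlt, if_pos hcond]
          have ih := ihk (a + 1) b (by omega)
          rw [show a + 1 - 1 = a by ring] at ih
          rw [hred]
          rcases ih with ⟨ht, hall, hlb⟩ | ⟨hf, j, hj1, hj2, hjX, hpre, hlb⟩
          · left
            refine ⟨ht, ?_, ?_⟩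
            · intro j hj1 hj2
              rcases eq_or_lt_of_le hj1 with rfl | hj1'
              · exact hX
              · exact hall j (by omega) hj2
            · rw [hlb, if_pos hlt]
              by_cases h2 : a + 1 < b
              · rw [if_pos h2]
              · rw [if_neg h2]; omega
          · right
            refine ⟨hf, j, by omega, hj2, hjX, ?_, hlb⟩
            intro i hi1 hi2
            rcases eq_or_lt_of_le hi1 with rfl | hi1'
            · exact hX
            · exact hpre i (by omega) hi2
        · have hcond : (cache.contains a && cache.getD a false) = false := by
            rw [PySem.Dict.contains_eq_isSome_get?, hc a, if_neg hX]
            rfl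
          have hred : pvInnerA cache a b (a - 1) = (a - 1, false) := by
            rw [pvInnerA, dif_pos hlt]
            simp [hcond]
          rw [hred]
          right
          exact ⟨rfl, a, le_refl a, hlt, hX, fun i hi1 hi2 => absurd (lt_of_le_of_lt hi1 hi2) (by omega), rfl⟩

lemma pvCard (s : List Int) (m : Int) (hm : 0 ≤ m) (hn : s.Nodup)
    (hsub : ∀ v ∈ s, 1 ≤ v ∧ v ≤ m) :
    ((s.length : Int) = m ↔ ∀ j : Int, 1 ≤ j → j ≤ m → j ∈ s) := by
  have hfs : s.toFinset ⊆ Finset.Icc (1 : Int) m := by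
    intro v hv
    rw [List.mem_toFinset] at hv
    exact Finset.mem_Icc.mpr (hsub v hv)
  constructor
  · intro h j h1 hj
    have hcard : (Finset.Icc (1 : Int) m).card ≤ s.toFinset.card := by
      rw [List.toFinset_card_of_nodup hn, Int.card_Icc]
      omega
    have heq := Finset.eq_of_subset_of_card_le hfs hcard
    have : j ∈ s.toFinset := by
      rw [heq]
      exact Finset.mem_Icc.mpr ⟨h1, hj⟩
    rwa [List.mem_toFinset] at this
  · intro h
    have heq : s.toFinset = Finset.Icc (1 : Int) m := by
      apply Finset.Subset.antisymm hfs
      intro j hj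
      rw [Finset.mem_Icc] at hj
      rw [List.mem_toFinset]
      exact h j hj.1 hj.2
    have := congrArg Finset.card heq
    rw [List.toFinset_card_of_nodup hn, Int.card_Icc] at this
    omega

lemma pvInv_holds (xs : List Int) : pvInv xs := by
  induction xs using List.reverseRecOn with
  | nil =>
      unfold pvInv
      dsimp only [List.foldl_nil]
      refine ⟨by trivial, by trivial, fun v => ?_, fun v => ?_, List.nodup_nil, le_refl 0, ?_, ?_, ?_,
        le_refl 0, le_refl 0⟩
      · simp [PySem.Dict.empty, PySem.Dict.get?]
      · simp [PySem.Set.empty]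
      · intro j hj1 hj2
        exact absurd (hj1.trans hj2) (by norm_num)
      · simp
      · intro v hv
        simp at hv
  | append_singleton ys l ih =>
      unfold pvInv at ih ⊢
      rw [List.foldl_append, List.foldl_append, List.foldl_cons, List.foldl_cons,
        List.foldl_nil, List.foldl_nil]
      rcases eA : ys.foldl pvStepA (0, 0, 0, (PySem.Dict.empty : PySem.Dict Int Bool)) with
        ⟨res, lb, M, cache⟩
      rcases eB : ys.foldl pvStepB ((PySem.Set.empty : PySem.Set Int), 0, 0) with
        ⟨seen, resB, mv⟩
      rw [eA, eB] at ih
      obtain ⟨h1, h2, h3, h4, h5, h6, h7, h8, h9, h10, h11⟩ := ih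
      dsimp only at h1 h2 h3 h4 h5 h6 h7 h8 h9 h10 h11 ⊢
      subst h1
      subst h2
      simp only [pvStepA, pvStepB]
      set m' := if M < l then l else M with hm'
      have hMm' : M ≤ m' ∧ l ≤ m' ∧ 0 ≤ m' := by
        rw [hm']; split <;> omega
      have hc' : ∀ v : Int, (cache.insert l true).get? v
          = if v ∈ ys ++ [l] then some true else none := by
        intro v
        rw [PySem.Dict.get?_insert]
        by_cases hv : v = l
        · simp [hv]
        · simp [hv, h3 v]
      have hle9 : ∀ v ∈ ys ++ [l], v ≤ m' := by
        intro v hv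
        rcases List.mem_append.mp hv with hy | hl'
        · exact le_trans (h9 v hy) hMm'.1
        · rw [List.mem_singleton] at hl'; omega
      by_cases hbr : lb = l - 1
      · -- A takes the lastBlue branch
        rw [if_pos hbr]
        have hl1 : (1 : Int) ≤ l := by omega
        have hlys : l ∉ ys := by
          have hyl : lb + 1 = l := by omega
          rwa [hyl] at h8
        have hseen : l ∉ seen := fun hmem => hlys ((h4 l).1 hmem).1
        have hcont : ¬ (PySem.Set.contains seen l = true) := by
          rw [PySem.Set.contains_iff]; exact hseen
        have hBcond : (1 : Int) ≤ l ∧ ¬ (PySem.Set.contains seen l = true) := ⟨hl1, hcont⟩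
        rw [if_pos hBcond]
        have hmem' : ∀ v : Int, v ∈ seen.add l ↔ (v ∈ ys ++ [l]) ∧ 1 ≤ v := by
          intro v
          rw [PySem.Set.mem_add, List.mem_append, List.mem_singleton]
          constructor
          · rintro (hv | rfl)
            · rcases (h4 v).1 hv with ⟨hvy, hv1⟩
              exact ⟨Or.inl hvy, hv1⟩
            · exact ⟨Or.inr rfl, hl1⟩
          · rintro ⟨hy | rfl, hv1⟩
            · exact Or.inl ((h4 v).2 ⟨hy, hv1⟩)
            · exact Or.inr rfl
        have hnodup' : (seen.add l).Nodup := PySem.Set.nodup_add seen l h5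
        have hsub' : ∀ v ∈ seen.add l, 1 ≤ v ∧ v ≤ m' := by
          intro v hv
          rcases (hmem' v).1 hv with ⟨hvm, hv1⟩
          exact ⟨hv1, hle9 v hvm⟩
        have hcard := pvCard (seen.add l) m' hMm'.2.2 hnodup' hsub'
        have hspec := pvInnerA_spec (cache.insert l true) (ys ++ [l]) hc'
          (m' - l).toNat (l + 1) (m' + 1) (by omega)
        rw [show l + 1 - 1 = l by ring] at hspec
        rcases hspec with ⟨ht, hall, hlb1⟩ | ⟨hf, j, hj1, hj2, hjX, hpre, hlb1⟩
        · -- all blue: both count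
          have hlbv : (pvInnerA (cache.insert l true) (l + 1) (m' + 1) l).1 = m' := by
            rw [hlb1]; split <;> omega
          have hP : ∀ i : Int, 1 ≤ i → i ≤ m' → i ∈ ys ++ [l] := by
            intro i hi1 hi2
            rcases lt_trichotomy i l with hlt | rfl | hgt
            · exact List.mem_append_left _ (h7 i hi1 (by omega))
            · simp
            · exact hall i (by omega) (by omega)
          have hlenm : PySem.Set.len (seen.add l) = m' := by
            show ((seen.add l).length : Int) = m'
            exact hcard.mpr fun i hi1 hi2 => (hmem' i).2 ⟨hP i hi1 hi2, hi1⟩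
          rw [if_pos hlenm]
          simp only [ht, hlbv, if_true]
          refine ⟨by trivial, by trivial, hc', hmem', hnodup', hMm'.2.2, hP, ?_, hle9, hMm'.2.2, le_refl _⟩
          intro hmem
          have := hle9 _ hmem
          omega
        · -- break at j: neither counts
          have hlenm : ¬ (PySem.Set.len (seen.add l) = m') := by
            intro heq
            have hAll := hcard.mp heq
            exact hjX ((hmem' j).1 (hAll j (by omega) (by omega))).1
          rw [if_neg hlenm]
          simp only [hf, hlb1, if_false, Bool.false_eq_true]
          refine ⟨by trivial, by trivial, hc', hmem', hnodup', by omega, ?_, ?_, hle9, hMm'.2.2, by omega⟩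
          · intro i hi1 hi2
            rcases lt_trichotomy i l with hlt | rfl | hgt
            · exact List.mem_append_left _ (h7 i hi1 (by omega))
            · simp
            · exact hpre i (by omega) (by omega)
          · rw [show j - 1 + 1 = j by ring]
            exact hjX
      · -- A skips
        rw [if_neg hbr]
        by_cases hBc : (1 : Int) ≤ l ∧ ¬ (PySem.Set.contains seen l = true)
        · -- B sees a fresh positive value, but cannot count
          rw [if_pos hBc]
          obtain ⟨hl1, hcont⟩ := hBc
          have hseen : l ∉ seen := fun hm => hcont ((PySem.Set.contains_iff seen l).mpr hm)
          have hlys : l ∉ ys := fun hm => hseen ((h4 l).2 ⟨hm, hl1⟩)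
          have hmem' : ∀ v : Int, v ∈ seen.add l ↔ (v ∈ ys ++ [l]) ∧ 1 ≤ v := by
            intro v
            rw [PySem.Set.mem_add, List.mem_append, List.mem_singleton]
            constructor
            · rintro (hv | rfl)
              · rcases (h4 v).1 hv with ⟨hvy, hv1⟩
                exact ⟨Or.inl hvy, hv1⟩
              · exact ⟨Or.inr rfl, hl1⟩
            · rintro ⟨hy | rfl, hv1⟩
              · exact Or.inl ((h4 v).2 ⟨hy, hv1⟩)
              · exact Or.inr rfl
          have hnodup' : (seen.add l).Nodup := PySem.Set.nodup_add seen l h5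
          have hsub' : ∀ v ∈ seen.add l, 1 ≤ v ∧ v ≤ m' := by
            intro v hv
            rcases (hmem' v).1 hv with ⟨hvm, hv1⟩
            exact ⟨hv1, hle9 v hvm⟩
          have hlenm : ¬ (PySem.Set.len (seen.add l) = m') := by
            intro heq
            have hAll := (pvCard (seen.add l) m' hMm'.2.2 hnodup' hsub').mp heq
            by_cases hlbm : lb + 1 ≤ m'
            · have hmemlb := ((hmem' (lb + 1)).1 (hAll (lb + 1) (by omega) hlbm)).1
              rcases List.mem_append.mp hmemlb with hy | hl'
              · exact h8 hy
              · rw [List.mem_singleton] at hl'; omega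
            · have hlbeq : lb = m' := by omega
              exact hlys (h7 l hl1 (by omega))
          rw [if_neg hlenm]
          dsimp only
          refine ⟨by trivial, by trivial, hc', hmem', hnodup', h6, ?_, ?_, hle9, hMm'.2.2, by omega⟩
          · intro i hi1 hi2
            exact List.mem_append_left _ (h7 i hi1 hi2)
          · intro hmem
            rcases List.mem_append.mp hmem with hy | hl'
            · exact h8 hy
            · rw [List.mem_singleton] at hl'; omega
        · -- B skips too
          rw [if_neg hBc]
          have hmem' : ∀ v : Int, v ∈ seen ↔ (v ∈ ys ++ [l]) ∧ 1 ≤ v := by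
            intro v
            rw [List.mem_append, List.mem_singleton]
            constructor
            · intro hv
              rcases (h4 v).1 hv with ⟨hvy, hv1⟩
              exact ⟨Or.inl hvy, hv1⟩
            · rintro ⟨hy | rfl, hv1⟩
              · exact (h4 v).2 ⟨hy, hv1⟩
              · rcases not_and_or.mp hBc with hno | hcc
                · exact absurd hv1 hno
                · rw [not_not, PySem.Set.contains_iff] at hcc
                  exact hcc
          dsimp only
          refine ⟨by trivial, by trivial, hc', hmem', h5, h6, ?_, ?_, hle9, hMm'.2.2, by omega⟩
          · intro i hi1 hi2
            exact List.mem_append_left _ (h7 i hi1 hi2)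
          · intro hmem
            rcases List.mem_append.mp hmem with hy | hl'
            · exact h8 hy
            · rw [List.mem_singleton] at hl'; omega

-- ===== VERDICT (by name: the statement is the Claim_ definition above) =====
theorem numTimesAllBlue_spec : Claim_equal_numTimesAllBlue := by
  intro light _
  show numTimesAllBlue light = numTimesAllBlue_alt light
  exact (pvInv_holds light).1
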